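-- pv_equiv track=rewrite | github.com/tmwileman/advent_of_code | advent_of_code_2021/day_1/day_1.py | sum_three_depths
-- ===== SOURCE A (Python) =====
-- from typing import List
--
-- def sum_three_depths(inputs: List[int]) -> List[int]:
--     """
--     Create a list of all sums of three sequential depths.
--
--     Inputs:
--         inputs: List of integers.
--     Output:
--         List: Sums of the combinations of three sequential depths.
--     """
--
--     combinations = []
--     for i, depth in enumerate(inputs[:-2]):
--         second_depth = inputs[i + 1]
--         third_depth = inputs[i + 2]
--         sum_of_depths = depth + second_depth + third_depth
--         combinations.append(sum_of_depths)
--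
--     return combinations
-- ===== SOURCE B (Python) =====
-- from typing import List
--
-- def sum_three_depths(inputs: List[int]) -> List[int]:
--     """Prefix-sum version: each window sum is a difference of two cumulative totals."""
--     prefix = [0]
--     for x in inputs:
--         prefix.append(prefix[-1] + x)
--     return [prefix[i + 3] - prefix[i] for i in range(len(inputs) - 2)]
-- ===== Notes on version B (the rewrite author's own statement) =====
-- stated objective: alternative
-- what changed: Replaces re-adding three elements per window with a prefix-sum table built once, each window sum obtained as prefix[i+3]-prefix[i].
import Mathlib
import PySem

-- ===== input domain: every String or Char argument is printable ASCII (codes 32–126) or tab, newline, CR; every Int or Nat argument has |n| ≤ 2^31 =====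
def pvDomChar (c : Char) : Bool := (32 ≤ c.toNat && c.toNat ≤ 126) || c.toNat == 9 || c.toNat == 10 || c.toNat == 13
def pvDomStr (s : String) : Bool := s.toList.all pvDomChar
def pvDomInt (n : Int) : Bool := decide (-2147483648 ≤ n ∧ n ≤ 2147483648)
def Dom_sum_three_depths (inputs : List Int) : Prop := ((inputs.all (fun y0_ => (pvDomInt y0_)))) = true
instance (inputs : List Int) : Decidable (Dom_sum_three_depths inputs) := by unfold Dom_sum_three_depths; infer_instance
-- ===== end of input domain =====

-- B replaces per-window re-addition with a prefix-sum table and one subtraction per window (alternative decomposition, same cost).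

-- ===== PORT A =====
-- the indices i+1, i+2 are always in range because i ranges over inputs[:-2]; default 0 is never used
def sum_three_depths (inputs : List Int) : List Int :=
  (PySem.List.enumerate (PySem.List.slice inputs none (some (-2)))).foldl
    (fun combinations p =>
      let second_depth := PySem.List.pyGetD inputs (p.1 + 1) 0
      let third_depth := PySem.List.pyGetD inputs (p.1 + 2) 0
      let sum_of_depths := p.2 + second_depth + third_depth
      combinations ++ [sum_of_depths]) []

-- ===== PORT B =====
def sum_three_depths_alt (inputs : List Int) : List Int :=
  let prefixSums := inputs.foldl
    (fun pre x => pre ++ [PySem.List.pyGetD pre (-1) 0 + x]) [0]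
  (PySem.List.pyRange 0 ((inputs.length : Int) - 2) 1).map
    (fun i => PySem.List.pyGetD prefixSums (i + 3) 0 - PySem.List.pyGetD prefixSums i 0)

-- ===== PRECONDITION & SPEC =====
def Spec_sum_three_depths (inputs : List Int) (out : List Int) : Prop := out = sum_three_depths_alt inputs
instance (inputs : List Int) (out : List Int) : Decidable (Spec_sum_three_depths inputs out) := by unfold Spec_sum_three_depths; infer_instance

-- ===== CLAIM (what is proved, stated in full; the proofs are below) =====
def Claim_equal_sum_three_depths : Prop := ∀ (inputs : List Int), Dom_sum_three_depths inputs → Spec_sum_three_depths inputs (sum_three_depths inputs)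

-- ===== LEMMAS AND PROOFS =====

-- running partial sums starting from s
def pvSums (s : Int) : List Int → List Int
  | [] => []
  | x :: xs => (s + x) :: pvSums (s + x) xs

theorem pv_foldl_prefix (xs acc : List Int) (s : Int) :
    xs.foldl (fun pre x => pre ++ [PySem.List.pyGetD pre (-1) 0 + x]) (acc ++ [s])
      = acc ++ [s] ++ pvSums s xs := by
  induction xs generalizing acc s with
  | nil => simp [pvSums]
  | cons x xs ih =>
      simp only [List.foldl_cons, PySem.List.pyGetD_neg_one_append_singleton]
      have := ih (acc ++ [s]) (s + x)
      simpa [pvSums, List.append_assoc] using this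

theorem pvSums_getD (xs : List Int) (s : Int) (k : Nat) (hk : k < xs.length) :
    (pvSums s xs).getD k 0 = s + (xs.take (k + 1)).sum := by
  induction xs generalizing s k with
  | nil => simp at hk
  | cons x xs ih =>
      cases k with
      | zero => simp [pvSums]
      | succ k =>
          simp only [pvSums, List.getD_cons_succ, List.take_succ_cons, List.sum_cons]
          rw [ih (s + x) k (by simpa using hk)]
          ring

theorem pv_prefix_getD (xs : List Int) (k : Nat) (hk : k ≤ xs.length) :
    (xs.foldl (fun pre x => pre ++ [PySem.List.pyGetD pre (-1) 0 + x]) [0]).getD k 0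
      = (xs.take k).sum := by
  have h := pv_foldl_prefix xs [] 0
  simp only [List.nil_append] at h
  rw [h]
  cases k with
  | zero => simp
  | succ k =>
      simp only [List.singleton_append, List.getD_cons_succ]
      rw [pvSums_getD xs 0 k (by omega)]
      simp

theorem pv_take_sum_succ (xs : List Int) (k : Nat) (hk : k < xs.length) :
    (xs.take (k + 1)).sum = (xs.take k).sum + xs.getD k 0 := by
  rw [List.getD_eq_getElem xs 0 hk]
  exact List.sum_take_succ xs k hk

-- ===== VERDICT (by name: the statement is the Claim_ definition above) =====
theorem sum_three_depths_spec : Claim_equal_sum_three_depths := by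
  intro inputs _
  show sum_three_depths inputs = sum_three_depths_alt inputs
  unfold sum_three_depths sum_three_depths_alt
  rw [PySem.List.slice_to_neg_ofNat inputs 2 (by omega)]
  rw [PySem.List.foldl_append_singleton_eq_map]
  rw [PySem.List.enumerate_eq_map_pyRange (d := 0), List.map_map]
  rw [PySem.List.pyRange_one, PySem.List.pyRange_one, List.map_map, List.map_map]
  have hlen : (PySem.List.len (inputs.take (inputs.length - 2)) - 0).toNat = ((inputs.length : Int) - 2 - 0).toNat := by
    simp [PySem.List.len, List.length_take]; omega
  rw [hlen]
  apply List.map_congr_left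
  intro k hk
  simp only [List.mem_range] at hk
  have hk2 : k + 2 < inputs.length := by omega
  simp only [Function.comp_apply]
  -- normalize all Int indices to Nat casts
  have e1 : (0 : Int) + (k : Int) + 1 = ((k + 1 : Nat) : Int) := by push_cast; ring
  have e2 : (0 : Int) + (k : Int) + 2 = ((k + 2 : Nat) : Int) := by push_cast; ring
  have e3 : (0 : Int) + (k : Int) + 3 = ((k + 3 : Nat) : Int) := by push_cast; ring
  have e0 : (0 : Int) + (k : Int) = ((k : Nat) : Int) := by ring
  rw [e1, e2, e3, e0]
  simp only [PySem.List.pyGetD_natCast]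
  have htake : (inputs.take (inputs.length - 2)).getD k 0 = inputs.getD k 0 := by
    rw [List.getD_eq_getElem?_getD, List.getD_eq_getElem?_getD, List.getElem?_take_of_lt (by omega)]
  rw [htake]
  rw [pv_prefix_getD inputs (k + 3) (by omega), pv_prefix_getD inputs k (by omega)]
  rw [show k + 3 = (k + 2) + 1 by ring]
  rw [pv_take_sum_succ inputs (k + 2) (by omega), pv_take_sum_succ inputs (k + 1) (by omega),
      pv_take_sum_succ inputs k (by omega)]
  ring
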